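-- pv_equiv track=rewrite | github.com/Katembo1/examdetections | app/models.py | _summarize_counts
-- ===== SOURCE A (Python) =====
-- from typing import Any
--
-- def _summarize_counts(predictions: list[dict[str, Any]]) -> str:
--     if not predictions:
--         return "No objects detected."
--     counts: dict[str, int] = {}
--     for prediction in predictions:
--         label = str(prediction.get("label", "object"))
--         counts[label] = counts.get(label, 0) + 1
--     return "\n".join(f"{label}: {count}" for label, count in sorted(counts.items()))
-- ===== SOURCE B (Python) =====
-- def _summarize_counts(predictions):
--     if not predictions:
--         return "No objects detected."
--     labels = sorted(str(p.get("label", "object")) for p in predictions)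
--
--     def group(ls):
--         # run-length encode a sorted list: emit one line per maximal run of equal labels
--         if not ls:
--             return []
--         head = ls[0]
--         run = 1
--         while run < len(ls) and ls[run] == head:
--             run += 1
--         return [f"{head}: {run}"] + group(ls[run:])
--
--     return "\n".join(group(labels))
-- ===== Notes on version B (the rewrite author's own statement) =====
-- stated objective: alternative
-- what changed: B replaces the hash-counting dict followed by sorting the items with sort-then-scan: it sorts the coerced labels first and then run-length encodes the sorted list, emitting one 'label: run-length' line per maximal run of adjacent equal labels.
import Mathlib
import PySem

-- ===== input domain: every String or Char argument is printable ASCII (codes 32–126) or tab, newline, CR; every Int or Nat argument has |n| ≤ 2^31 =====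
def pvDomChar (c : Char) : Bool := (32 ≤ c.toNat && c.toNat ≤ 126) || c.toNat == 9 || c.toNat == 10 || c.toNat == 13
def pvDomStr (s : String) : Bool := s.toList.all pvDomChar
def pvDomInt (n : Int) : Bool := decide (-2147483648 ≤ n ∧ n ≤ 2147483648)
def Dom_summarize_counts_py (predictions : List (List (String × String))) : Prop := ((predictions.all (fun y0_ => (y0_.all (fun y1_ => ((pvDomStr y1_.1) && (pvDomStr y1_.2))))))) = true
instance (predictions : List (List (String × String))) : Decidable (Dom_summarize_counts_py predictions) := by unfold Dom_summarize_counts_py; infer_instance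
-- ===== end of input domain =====

-- B replaces hash-counting + sorting the dict items with sort-then-scan: sort the coerced
-- labels, then run-length encode the sorted list (one line per maximal run of equal labels);
-- return value proved equal to A's on every input.

-- prediction.get("label", "object"): first match in the association list, else the default
def pvDictGetStr (p : List (String × String)) (k dflt : String) : String :=
  ((p.find? (fun kv => kv.1 == k)).map (fun kv => kv.2)).getD dflt

-- ===== PORT A =====
def summarize_counts_py (predictions : List (List (String × String))) : String :=
  if predictions = [] then "No objects detected."
  else
    let counts : PySem.Dict String Int :=
      predictions.foldl
        (fun d prediction =>
          let label := pvDictGetStr prediction "label" "object"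
          d.insert label (d.getD label 0 + 1))
        PySem.Dict.empty
    PySem.Str.join "\n"
      ((PySem.List.sorted2 counts.items (fun lc => lc.1) (fun lc => lc.2) false).map
        (fun lc => lc.1 ++ ": " ++ PySem.Int.toStr lc.2))

-- ===== PORT B =====
-- group(ls): the inner while loop advances run while ls[run] == ls[0], i.e. run =
-- 1 + length of the equal prefix of the tail; the recursive call takes ls[run:].
def pvGroupRuns : List String → List String
  | [] => []
  | head :: rest =>
    let run : Nat := (rest.takeWhile (fun x => x == head)).length + 1
    (head ++ ": " ++ PySem.Int.toStr (run : Int)) :: pvGroupRuns ((head :: rest).drop run)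
termination_by l => l.length
decreasing_by simp [List.length_drop]

def summarize_counts_py_alt (predictions : List (List (String × String))) : String :=
  if predictions = [] then "No objects detected."
  else
    let labels := PySem.List.sorted
      (predictions.map (fun p => pvDictGetStr p "label" "object")) (fun x => x) false
    PySem.Str.join "\n" (pvGroupRuns labels)

-- ===== PRECONDITION & SPEC =====
def Spec_summarize_counts_py (predictions : List (List (String × String))) (out : String) : Prop := out = summarize_counts_py_alt predictions
instance (predictions : List (List (String × String))) (out : String) : Decidable (Spec_summarize_counts_py predictions out) := by unfold Spec_summarize_counts_py; infer_instance

-- ===== CLAIM =====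
def Claim_equal_summarize_counts_py : Prop := ∀ (predictions : List (List (String × String))), Dom_summarize_counts_py predictions → Spec_summarize_counts_py predictions (summarize_counts_py predictions)

-- ===== LEMMAS AND PROOFS =====

-- proof-only helper: the run heads (the distinct labels, in order) of a list
def pvKeys : List String → List String
  | [] => []
  | head :: rest => head :: pvKeys (rest.dropWhile (fun x => x == head))
termination_by l => l.length
decreasing_by simpa using Nat.lt_succ_of_le (List.length_dropWhile_le _ _)

theorem pvDrop_takeWhile (p : String → Bool) (l : List String) :
    l.drop (l.takeWhile p).length = l.dropWhile p := by
  induction l with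
  | nil => rfl
  | cons x xs ih =>
    by_cases h : p x = true
    · simp [h, ih]
    · simp [h]

theorem pvLt_of_mem_dropWhile (a : String) :
    ∀ (l : List String), l.Pairwise (· ≤ ·) → (∀ y ∈ l, a ≤ y) →
      ∀ x ∈ l.dropWhile (fun y => y == a), a < x := by
  intro l
  induction l with
  | nil => intro _ _ x hx; simp at hx
  | cons b bs ih =>
    intro hp hal x hx
    by_cases hb : (b == a) = true
    · exact ih hp.of_cons (fun y hy => hal y (by simp [hy]))
        x (by simpa [List.dropWhile_cons, hb] using hx)
    · rw [List.dropWhile_cons, if_neg (by simp [hb])] at hx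
      have hab : a < b := lt_of_le_of_ne (hal b (by simp)) (fun h => hb (by simp [h.symm]))
      rcases List.mem_cons.mp hx with rfl | hxs
      · exact hab
      · exact lt_of_lt_of_le hab (List.rel_of_pairwise_cons hp hxs)

theorem pvCount_head (a : String) (rest : List String) (h : (a :: rest).Pairwise (· ≤ ·)) :
    (a :: rest).count a = (rest.takeWhile (fun x => x == a)).length + 1 := by
  have hsplit := List.takeWhile_append_dropWhile (p := fun x => x == a) (l := rest)
  have hct : (rest.takeWhile (fun x => x == a)).count a
      = (rest.takeWhile (fun x => x == a)).length := by
    apply List.count_eq_length.mpr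
    intro y hy
    have := List.mem_takeWhile_imp hy
    simp at this; simp [this]
  have hcd : (rest.dropWhile (fun x => x == a)).count a = 0 := by
    apply List.count_eq_zero.mpr
    intro hmem
    exact absurd rfl (ne_of_gt (pvLt_of_mem_dropWhile a rest h.of_cons
      (fun y hy => List.rel_of_pairwise_cons h hy) a hmem))
  calc (a :: rest).count a = rest.count a + 1 := by simp
    _ = ((rest.takeWhile (fun x => x == a)) ++ (rest.dropWhile (fun x => x == a))).count a + 1 := by
          rw [hsplit]
    _ = (rest.takeWhile (fun x => x == a)).length + 1 := by
          rw [List.count_append, hct, hcd]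

theorem pvCount_tail (a k : String) (rest : List String) (hk : a < k) :
    (a :: rest).count k = (rest.dropWhile (fun x => x == a)).count k := by
  have hsplit := List.takeWhile_append_dropWhile (p := fun x => x == a) (l := rest)
  have hct : (rest.takeWhile (fun x => x == a)).count k = 0 := by
    apply List.count_eq_zero.mpr
    intro hmem
    have := List.mem_takeWhile_imp hmem
    simp at this
    exact absurd (this ▸ hk) (lt_irrefl k)
  calc (a :: rest).count k = rest.count k := by
        simp [List.count_cons]
        exact fun h => lt_irrefl k (h ▸ hk)
    _ = ((rest.takeWhile (fun x => x == a)) ++ (rest.dropWhile (fun x => x == a))).count k := by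
          rw [hsplit]
    _ = (rest.dropWhile (fun x => x == a)).count k := by rw [List.count_append, hct]; simp

theorem pvKeys_props : ∀ (n : Nat) (s : List String), s.length ≤ n → s.Pairwise (· ≤ ·) →
    (pvKeys s).Pairwise (· < ·) ∧ (∀ x, x ∈ pvKeys s ↔ x ∈ s) := by
  intro n
  induction n with
  | zero =>
    intro s hs _
    have : s = [] := List.eq_nil_of_length_eq_zero (Nat.le_zero.mp hs)
    subst this
    exact ⟨by simp [pvKeys], by simp [pvKeys]⟩
  | succ m ih =>
    intro s hs hp
    match s with
    | [] => exact ⟨by simp [pvKeys], by simp [pvKeys]⟩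
    | a :: rest =>
      have hlen : (rest.dropWhile (fun x => x == a)).length ≤ m :=
        le_trans (List.length_dropWhile_le _ _) (Nat.lt_succ_iff.mp (by simpa using hs))
      have hpt : (rest.dropWhile (fun x => x == a)).Pairwise (· ≤ ·) :=
        hp.of_cons.sublist (List.dropWhile_sublist _)
      obtain ⟨hpw, hmem⟩ := ih _ hlen hpt
      have hgt : ∀ x ∈ rest.dropWhile (fun x => x == a), a < x :=
        pvLt_of_mem_dropWhile a rest hp.of_cons (fun y hy => List.rel_of_pairwise_cons hp hy)
      constructor
      · rw [pvKeys]
        exact List.pairwise_cons.mpr ⟨fun x hx => hgt x ((hmem x).mp hx), hpw⟩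
      · intro x
        rw [pvKeys]
        constructor
        · intro hx
          rcases List.mem_cons.mp hx with rfl | hx'
          · simp
          · exact List.mem_cons.mpr (Or.inr
              ((List.dropWhile_sublist (l := rest) (p := fun x => x == a)).mem ((hmem x).mp hx')))
        · intro hx
          rcases List.mem_cons.mp hx with rfl | hx'
          · simp
          · by_cases hxa : x = a
            · simp [hxa]
            · refine List.mem_cons.mpr (Or.inr ((hmem x).mpr ?_))
              -- x ∈ rest, x ≠ a: it survives dropWhile since the dropped prefix is all a's
              have hsplit := List.takeWhile_append_dropWhile (p := fun y => y == a) (l := rest)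
              rw [← hsplit] at hx'
              rcases List.mem_append.mp hx' with h1 | h2
              · have := List.mem_takeWhile_imp h1
                simp at this
                exact absurd this hxa
              · exact h2

theorem pvGroup_eq : ∀ (n : Nat) (s : List String), s.length ≤ n → s.Pairwise (· ≤ ·) →
    pvGroupRuns s
      = (pvKeys s).map (fun k => k ++ ": " ++ PySem.Int.toStr (s.count k : Int)) := by
  intro n
  induction n with
  | zero =>
    intro s hs _
    have : s = [] := List.eq_nil_of_length_eq_zero (Nat.le_zero.mp hs)
    subst this
    rw [pvGroupRuns.eq_def]
    simp [pvKeys]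
  | succ m ih =>
    intro s hs hp
    match s with
    | [] => rw [pvGroupRuns.eq_def]; simp [pvKeys]
    | a :: rest =>
      rw [pvGroupRuns.eq_def, pvKeys]
      have hdrop : (a :: rest).drop ((rest.takeWhile (fun x => x == a)).length + 1)
          = rest.dropWhile (fun x => x == a) := by
        simpa using pvDrop_takeWhile (fun x => x == a) rest
      have hlen : (rest.dropWhile (fun x => x == a)).length ≤ m :=
        le_trans (List.length_dropWhile_le _ _) (Nat.lt_succ_iff.mp (by simpa using hs))
      have hpt : (rest.dropWhile (fun x => x == a)).Pairwise (· ≤ ·) :=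
        hp.of_cons.sublist (List.dropWhile_sublist _)
      have hgt : ∀ x ∈ rest.dropWhile (fun x => x == a), a < x :=
        pvLt_of_mem_dropWhile a rest hp.of_cons (fun y hy => List.rel_of_pairwise_cons hp hy)
      simp only [hdrop, List.map_cons]
      congr 1
      · rw [pvCount_head a rest hp]
      · rw [ih _ hlen hpt]
        apply List.map_congr_left
        intro k hk
        have hkmem : k ∈ rest.dropWhile (fun x => x == a) :=
          ((pvKeys_props m _ hlen hpt).2 k).mp hk
        rw [pvCount_tail a k rest (hgt k hkmem)]

theorem pvInsertBy_congr {α : Type} (p q : α → α → Bool) (x : α) (acc : List α)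
    (h : ∀ y ∈ acc, p x y = q x y) :
    PySem.List.insertBy p x acc = PySem.List.insertBy q x acc := by
  induction acc with
  | nil => rfl
  | cons y ys ih =>
    have hy : p x y = q x y := h y (by simp)
    simp only [PySem.List.insertBy, hy]
    split
    · rfl
    · rw [ih (fun z hz => h z (by simp [hz]))]

theorem pvFoldl_insertBy_congr {α : Type} (p q : α → α → Bool) (S : List α)
    (hpq : ∀ a ∈ S, ∀ b ∈ S, p a b = q a b) :
    ∀ (xs acc : List α), (∀ a ∈ xs, a ∈ S) → (∀ y ∈ acc, y ∈ S) →
      xs.foldl (fun acc x => PySem.List.insertBy p x acc) acc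
        = xs.foldl (fun acc x => PySem.List.insertBy q x acc) acc := by
  intro xs
  induction xs with
  | nil => intro acc _ _; rfl
  | cons x xs ih =>
    intro acc hxs hacc
    have hx : x ∈ S := hxs x (by simp)
    simp only [List.foldl_cons]
    rw [pvInsertBy_congr p q x acc (fun y hy => hpq x hx y (hacc y hy))]
    refine ih _ (fun a ha => hxs a (by simp [ha])) ?_
    intro y hy
    rcases (PySem.List.mem_insertBy q x y acc).mp hy with h1 | h2
    · exact h1 ▸ hx
    · exact hacc y h2

-- when the first components are distinct, Python's tuple sort is a sort by the first component
theorem pvSorted2_eq_sorted_fst {κ₁ κ₂ : Type} [LinearOrder κ₁] [LinearOrder κ₂]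
    (xs : List (κ₁ × κ₂)) (h : ∀ a ∈ xs, ∀ b ∈ xs, a.1 = b.1 → a = b) :
    PySem.List.sorted2 xs (fun lc => lc.1) (fun lc => lc.2) false
      = PySem.List.sorted xs (fun lc => lc.1) false := by
  rw [PySem.List.sorted_eq_foldl_insertBy]
  simp only [PySem.List.sorted2, if_neg (by decide : ¬ (false = true))]
  apply pvFoldl_insertBy_congr _ _ xs _ xs [] (fun a ha => ha) (by simp)
  intro a ha b hb
  by_cases hfst : a.1 = b.1
  · have : a = b := h a ha b hb hfst
    subst this
    simp
  · rcases lt_or_gt_of_ne hfst with hlt | hgt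
    · simp [hlt]
    · have h1 : ¬ a.1 < b.1 := not_lt_of_gt hgt
      simp [hgt, h1]

theorem summarize_counts_eq (predictions : List (List (String × String))) :
    summarize_counts_py predictions = summarize_counts_py_alt predictions := by
  unfold summarize_counts_py summarize_counts_py_alt
  by_cases hnil : predictions = []
  · simp [hnil]
  · simp only [if_neg hnil]
    set labels := predictions.map (fun p => pvDictGetStr p "label" "object") with hlabels
    -- A's side: the counter's sorted items, as a map over the sorted distinct labels
    have hcounts :
        predictions.foldl
          (fun d prediction =>
            let label := pvDictGetStr prediction "label" "object"
            d.insert label (d.getD label 0 + 1))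
          (PySem.Dict.empty : PySem.Dict String Int)
          = PySem.Dict.counter labels := by
      rw [hlabels, ← PySem.Dict.foldl_insert_getD_add_one_eq_counter, List.foldl_map]
    rw [hcounts, PySem.Dict.items_counter]
    set f : String → String × Int := fun k => (k, (labels.count k : Int)) with hf
    have hinj : ∀ a ∈ (PySem.Set.ofList labels).map f, ∀ b ∈ (PySem.Set.ofList labels).map f,
        a.1 = b.1 → a = b := by
      intro a ha b hb hab
      rcases List.mem_map.mp ha with ⟨k, _, hk⟩
      rcases List.mem_map.mp hb with ⟨k', _, hk'⟩
      subst hk; subst hk'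
      simp only [hf] at hab ⊢
      rw [hab]
    rw [pvSorted2_eq_sorted_fst _ hinj]
    have hperm : ((PySem.List.sorted (PySem.Set.ofList labels) (fun x => x) false).map f).Perm
        ((PySem.Set.ofList labels).map f) :=
      (PySem.List.sorted_perm (PySem.Set.ofList labels) (fun x => x) false).map f
    have hpair : List.Pairwise (fun a b => (a : String × Int).1 < b.1)
        ((PySem.List.sorted (PySem.Set.ofList labels) (fun x => x) false).map f) := by
      refine List.Pairwise.map f (fun a b hab => ?_) (PySem.List.sorted_ofList_pairwise_lt labels)
      simpa [hf] using hab
    rw [PySem.List.sorted_eq_of_perm_of_pairwise_lt _ _ _ hperm hpair]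
    rw [List.map_map]
    -- B's side: run-length encode the sorted labels
    set s := PySem.List.sorted labels (fun x => x) false with hsdef
    have hsp : s.Pairwise (· ≤ ·) := by
      simpa using PySem.List.sorted_pairwise labels (fun x => x)
    have hsperm : s.Perm labels := PySem.List.sorted_perm labels (fun x => x) false
    rw [pvGroup_eq s.length s (le_refl _) hsp]
    -- same keys: pvKeys s is the strictly increasing list of the distinct labels
    obtain ⟨hkpw, hkmem⟩ := pvKeys_props s.length s (le_refl _) hsp
    have hknodup : (pvKeys s).Nodup := List.Pairwise.imp ne_of_lt hkpw
    have hkperm : (pvKeys s).Perm (PySem.Set.ofList labels) := by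
      rw [List.perm_ext_iff_of_nodup hknodup (PySem.Set.nodup_ofList labels)]
      intro x
      rw [hkmem x, PySem.Set.mem_ofList]
      exact hsperm.mem_iff
    have hsortkeys : PySem.List.sorted (PySem.Set.ofList labels) (fun x => x) false = pvKeys s :=
      PySem.List.sorted_eq_of_perm_of_pairwise_lt _ _ _ hkperm (by simpa using hkpw)
    rw [hsortkeys]
    refine congrArg (PySem.Str.join "\n") (List.map_congr_left ?_)
    intro k _
    simp only [Function.comp, hf]
    rw [hsperm.count_eq]

-- ===== VERDICT =====
theorem summarize_counts_py_spec : Claim_equal_summarize_counts_py := by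
  intro predictions _
  unfold Spec_summarize_counts_py
  exact summarize_counts_eq predictions
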